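-- pv_equiv track=rewrite | github.com/bryanrandell/DaVinciResolve-Adding_Scene_Slate_Take_to_Clip_Metadata | Workflow Integration Plugins/meta_utility_utils.py | convert_frame_to_timecode
-- ===== SOURCE A (Python) =====
-- def convert_frame_to_timecode(number_of_frames, project_fps):
-- 	hours, minutes, seconds, frames = 0, 0, 0, 0
-- 	for i in range(number_of_frames):
-- 		if frames == project_fps:
-- 			seconds += 1
-- 			frames = 0
-- 		if seconds == 60:
-- 			minutes += 1
-- 			seconds = 0
-- 		if minutes == 60:
-- 			hours += 1
-- 			minutes = 0
-- 		frames += 1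
-- 	return "{:02d}:{:02d}:{:02d}:{:02d}".format(hours, minutes, seconds, frames)
-- ===== SOURCE B (Python) =====
-- def convert_frame_to_timecode(number_of_frames, project_fps):
-- 	if number_of_frames <= 0:
-- 		return "00:00:00:00"
-- 	frames = (number_of_frames - 1) % project_fps + 1
-- 	total_seconds = (number_of_frames - 1) // project_fps
-- 	hours = total_seconds // 3600
-- 	minutes = total_seconds // 60 % 60
-- 	seconds = total_seconds % 60
-- 	return "{:02d}:{:02d}:{:02d}:{:02d}".format(hours, minutes, seconds, frames)
-- ===== Notes on version B (the rewrite author's own statement) =====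
-- stated objective: faster
-- what changed: Replaced the frame-by-frame counting loop with a closed-form base conversion (floor division / modulo on the frame index), keeping the same format string.
-- outside the precondition, e.g. on convert_frame_to_timecode(5, 0): A returns '00:00:01:05', B raises ZeroDivisionError; on convert_frame_to_timecode(5, -3): A returns '00:00:00:05', B returns '-1:59:58:-1'
import Mathlib
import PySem

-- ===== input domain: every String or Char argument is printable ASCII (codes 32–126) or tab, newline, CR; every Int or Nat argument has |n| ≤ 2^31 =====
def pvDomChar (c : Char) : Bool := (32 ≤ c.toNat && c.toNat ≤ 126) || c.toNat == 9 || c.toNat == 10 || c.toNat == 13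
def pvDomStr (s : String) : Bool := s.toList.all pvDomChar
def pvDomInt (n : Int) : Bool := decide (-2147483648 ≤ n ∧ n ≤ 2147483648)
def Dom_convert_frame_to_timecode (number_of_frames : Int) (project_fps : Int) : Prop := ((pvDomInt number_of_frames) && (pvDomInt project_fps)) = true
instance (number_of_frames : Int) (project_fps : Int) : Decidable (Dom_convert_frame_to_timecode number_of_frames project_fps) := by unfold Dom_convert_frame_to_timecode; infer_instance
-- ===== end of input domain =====

-- B replaces A's frame-by-frame counting loop with a closed-form base conversion (O(1) vs O(n)); same format string.

-- ===== PORT A =====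
-- "{:02d}".format(n): str(n), zero-padded on the left to width 2 (the sign counts toward the width)
def pvFmt02 (n : Int) : String :=
  let s := PySem.Int.toStr n
  if s.length < 2 then "0" ++ s else s

-- the body of A's for-loop, acting on the state (hours, minutes, seconds, frames)
def pvStepA (project_fps : Int) (st : Int × Int × Int × Int) : Int × Int × Int × Int :=
  let hours := st.1; let minutes := st.2.1; let seconds := st.2.2.1; let frames := st.2.2.2
  let sf : Int × Int := if frames = project_fps then (seconds + 1, 0) else (seconds, frames)
  let seconds := sf.1; let frames := sf.2
  let ms : Int × Int := if seconds = 60 then (minutes + 1, 0) else (minutes, seconds)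
  let minutes := ms.1; let seconds := ms.2
  let hm : Int × Int := if minutes = 60 then (hours + 1, 0) else (hours, minutes)
  let hours := hm.1; let minutes := hm.2
  (hours, minutes, seconds, frames + 1)

def convert_frame_to_timecode (number_of_frames : Int) (project_fps : Int) : String :=
  let st := (PySem.List.pyRange 0 number_of_frames 1).foldl
      (fun st _ => pvStepA project_fps st) ((0 : Int), (0 : Int), (0 : Int), (0 : Int))
  pvFmt02 st.1 ++ ":" ++ pvFmt02 st.2.1 ++ ":" ++ pvFmt02 st.2.2.1 ++ ":" ++ pvFmt02 st.2.2.2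

-- ===== PORT B =====
def convert_frame_to_timecode_alt (number_of_frames : Int) (project_fps : Int) : String :=
  if number_of_frames ≤ 0 then "00:00:00:00"
  else
    let frames := PySem.Int.mod (number_of_frames - 1) project_fps + 1
    let total_seconds := PySem.Int.floordiv (number_of_frames - 1) project_fps
    let hours := PySem.Int.floordiv total_seconds 3600
    let minutes := PySem.Int.mod (PySem.Int.floordiv total_seconds 60) 60
    let seconds := PySem.Int.mod total_seconds 60
    pvFmt02 hours ++ ":" ++ pvFmt02 minutes ++ ":" ++ pvFmt02 seconds ++ ":" ++ pvFmt02 frames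

-- ===== PRECONDITION & SPEC =====
-- Pre_ excludes project_fps ≤ 0, outside the natural domain of a frame rate: there A's loop returns
-- leftover counter values while B's division either raises (fps = 0) or yields negative fields.
def Pre_convert_frame_to_timecode (number_of_frames : Int) (project_fps : Int) : Prop :=
  1 ≤ project_fps
instance (number_of_frames : Int) (project_fps : Int) : Decidable (Pre_convert_frame_to_timecode number_of_frames project_fps) := by unfold Pre_convert_frame_to_timecode; infer_instance

def pvWitness_convert_frame_to_timecode : Int × Int := (25, 24)

def Spec_convert_frame_to_timecode (number_of_frames : Int) (project_fps : Int) (out : String) : Prop := out = convert_frame_to_timecode_alt number_of_frames project_fps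
instance (number_of_frames : Int) (project_fps : Int) (out : String) : Decidable (Spec_convert_frame_to_timecode number_of_frames project_fps out) := by unfold Spec_convert_frame_to_timecode; infer_instance

-- ===== CLAIM (what is proved, stated in full; the proofs are below) =====
def Claim_equal_convert_frame_to_timecode : Prop := ∀ (number_of_frames : Int) (project_fps : Int), Dom_convert_frame_to_timecode number_of_frames project_fps → Pre_convert_frame_to_timecode number_of_frames project_fps → Spec_convert_frame_to_timecode number_of_frames project_fps (convert_frame_to_timecode number_of_frames project_fps)

-- ===== LEMMAS AND PROOFS =====

-- closed-form state of A's loop after t iterations (Euclidean div/mod; all values nonnegative here)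
def pvG (fps : Int) (t : Nat) : Int × Int × Int × Int :=
  if t = 0 then (0, 0, 0, 0)
  else
    let k : Int := (t : Int) - 1
    let ts := k / fps
    (ts / 3600, ts / 60 % 60, ts % 60, k % fps + 1)

theorem pv_foldl_const {α β : Type} (l : List α) (f : β → β) (init : β) :
    l.foldl (fun s _ => f s) init = f^[l.length] init := by
  induction l generalizing init with
  | nil => rfl
  | cons a l ih => simp [List.foldl, ih, Function.iterate_succ_apply]


theorem pv_step_closed (fps k : Int) (hfps : 1 ≤ fps) :
    pvStepA fps (k/fps/3600, k/fps/60%60, k/fps%60, k%fps+1)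
      = ((k+1)/fps/3600, (k+1)/fps/60%60, (k+1)/fps%60, (k+1)%fps+1) := by
  have hpos : (0:Int) < fps := by omega
  have hq : fps * (k / fps) + k % fps = k := Int.mul_ediv_add_emod _ _
  have hr0 : 0 ≤ k % fps := Int.emod_nonneg _ (by omega)
  have hr1 : k % fps < fps := Int.emod_lt_of_pos _ hpos
  by_cases hroll : k % fps + 1 = fps
  · have hmul : fps * (k / fps + 1) = fps * (k / fps) + fps := by ring
    have h := (Int.ediv_emod_unique (a := k + 1) (b := fps) (r := 0) (q := k / fps + 1) hpos).mpr
      ⟨by omega, by omega, by omega⟩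
    rw [h.1, h.2]
    simp [pvStepA, hroll]
    split_ifs <;> simp_all <;> omega
  · have h := (Int.ediv_emod_unique (a := k + 1) (b := fps) (r := k % fps + 1) (q := k / fps) hpos).mpr
      ⟨by omega, by omega, by omega⟩
    rw [h.1, h.2]
    simp [pvStepA, hroll]
    split_ifs <;> simp_all <;> omega

theorem pv_step_g (fps : Int) (hfps : 1 ≤ fps) (t : Nat) :
    pvStepA fps (pvG fps t) = pvG fps (t + 1) := by
  cases t with
  | zero =>
      have h0 : ¬ ((0:Int) = fps) := by omega
      simp [pvG, pvStepA, h0]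
  | succ s =>
      have h1 : ((s+1 : Nat) : Int) - 1 = (s : Int) := by push_cast; ring
      have h2 : ((s+2 : Nat) : Int) - 1 = (s : Int) + 1 := by push_cast; ring
      have := pv_step_closed fps (s : Int) hfps
      simp only [pvG, if_neg (by omega : ¬ (s+1 = 0)), if_neg (by omega : ¬ (s+1+1 = 0)), h1]
      rw [this]
      congr 1 <;> push_cast <;> ring_nf

theorem pv_iter_g (fps : Int) (hfps : 1 ≤ fps) (t : Nat) :
    (pvStepA fps)^[t] ((0 : Int), (0 : Int), (0 : Int), (0 : Int)) = pvG fps t := by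
  induction t with
  | zero => simp [pvG]
  | succ s ih => rw [Function.iterate_succ_apply', ih, pv_step_g fps hfps]

-- ===== VERDICT (by name: the statement is the Claim_ definition above) =====
theorem convert_frame_to_timecode_spec : Claim_equal_convert_frame_to_timecode := by
  intro n fps hdom hpre
  have hfps : 1 ≤ fps := hpre
  unfold Spec_convert_frame_to_timecode
  by_cases hn : n ≤ 0
  · have hz : (n - 0).toNat = 0 := by omega
    simp [convert_frame_to_timecode, convert_frame_to_timecode_alt, hn]
    decide
  · have ht : 1 ≤ n.toNat := by omega
    have hfold : (PySem.List.pyRange 0 n 1).foldl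
        (fun st _ => pvStepA fps st) ((0 : Int), (0 : Int), (0 : Int), (0 : Int))
        = pvG fps n.toNat := by
      rw [pv_foldl_const, ← pv_iter_g fps hfps]
      congr 1
      simp [PySem.List.pyRange_one]
    have hk : ((n.toNat : Nat) : Int) - 1 = n - 1 := by omega
    rw [convert_frame_to_timecode, hfold]
    rw [pvG, if_neg (by omega : ¬ (n.toNat = 0)), hk]
    rw [convert_frame_to_timecode_alt, if_neg hn]
    simp [PySem.Int.floordiv_eq_ediv_of_pos (by omega : (0:Int) < fps),
      PySem.Int.mod_eq_emod_of_pos (by omega : (0:Int) < fps),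
      PySem.Int.floordiv_eq_ediv_of_pos, PySem.Int.mod_eq_emod_of_pos]
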